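-- pv_equiv track=rewrite | github.com/hyunjee-k/algorithm | sliding_window/pro132265.py | solution
-- ===== SOURCE A (Python) =====
-- from collections import Counter
--
-- def solution(topping):
--     answer = 0
--     dic = Counter(topping)
--     set_dic = set()
--     answer = 0
--
--     for i in topping:
--         dic[i] -= 1
--         set_dic.add(i)
--         if dic[i] == 0:
--             dic.pop(i)
--         if len(dic) == len(set_dic):
--             answer += 1
--
--     return answer
-- ===== SOURCE B (Python) =====
-- def solution(topping):
--     # rights[i] = number of distinct values in topping[i+1:]
--     rights = []
--     seen = set()
--     for x in reversed(topping):
--         rights.append(len(seen))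
--         seen.add(x)
--     rights.reverse()
--     # lefts[i] = number of distinct values in topping[:i+1]
--     lefts = []
--     seen = set()
--     for x in topping:
--         seen.add(x)
--         lefts.append(len(seen))
--     return sum(1 for l, r in zip(lefts, rights) if l == r)
-- ===== Notes on version B (the rewrite author's own statement) =====
-- stated objective: alternative
-- what changed: B precomputes a suffix distinct-count table with a reversed pass and a prefix distinct-count list, then counts matching split points in a separate zip pass, instead of A's lockstep Counter-decrement/pop mutation alongside a growing set; replacing per-element dict mutation (decrement, compare, pop) by plain set growth gives a constant-factor speedup.
import Mathlib
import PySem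

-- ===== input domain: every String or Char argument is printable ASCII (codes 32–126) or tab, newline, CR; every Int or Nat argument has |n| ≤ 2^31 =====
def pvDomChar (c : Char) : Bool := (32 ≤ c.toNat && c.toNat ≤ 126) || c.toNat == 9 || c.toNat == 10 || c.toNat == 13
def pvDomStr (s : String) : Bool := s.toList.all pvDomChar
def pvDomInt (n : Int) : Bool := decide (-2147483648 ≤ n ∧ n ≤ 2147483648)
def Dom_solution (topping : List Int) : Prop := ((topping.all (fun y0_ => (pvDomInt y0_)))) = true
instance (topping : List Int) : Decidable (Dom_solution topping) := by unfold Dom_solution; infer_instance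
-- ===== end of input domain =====

-- B replaces A's lockstep Counter-decrement loop by a precomputed suffix distinct-count table
-- plus a prefix pass and a final zip comparison (alternative decomposition, same O(n) cost).

-- ===== PORT A =====
-- one iteration of A's loop body over state (dic, set_dic, answer)
def Astep (st : PySem.Dict Int Int × PySem.Set Int × Int) (i : Int) :
    PySem.Dict Int Int × PySem.Set Int × Int :=
  let dic1 := st.1.modify i 0 (· - 1)                         -- dic[i] -= 1 (Counter: missing key reads 0)
  let set_dic := PySem.Set.add st.2.1 i                       -- set_dic.add(i)
  -- dic.pop(i): the key i is always present here (dic[i] was just assigned), so pop = erase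
  let dic2 := if dic1.getD i 0 = 0 then dic1.erase i else dic1
  let answer := if dic2.size = PySem.Set.len set_dic then st.2.2 + 1 else st.2.2
  (dic2, set_dic, answer)

def solution (topping : List Int) : Int :=
  (topping.foldl Astep (PySem.Dict.counter topping, PySem.Set.empty, (0 : Int))).2.2

-- ===== PORT B =====
def solution_alt (topping : List Int) : Int :=
  -- rights[i] = number of distinct values in topping[i+1:]
  let rights := ((topping.reverse.foldl
      (fun (p : PySem.Set Int × List Int) x =>
        (PySem.Set.add p.1 x, p.2 ++ [(PySem.Set.len p.1 : Int)]))
      (PySem.Set.empty, [])).2).reverse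
  -- lefts[i] = number of distinct values in topping[:i+1]
  let lefts := (topping.foldl
      (fun (p : PySem.Set Int × List Int) x =>
        let s := PySem.Set.add p.1 x
        (s, p.2 ++ [(PySem.Set.len s : Int)]))
      (PySem.Set.empty, [])).2
  (lefts.zip rights).foldl (fun acc p => if p.1 == p.2 then acc + 1 else acc) 0

-- ===== PRECONDITION & SPEC =====
def Spec_solution (topping : List Int) (out : Int) : Prop := out = solution_alt topping
instance (topping : List Int) (out : Int) : Decidable (Spec_solution topping out) := by unfold Spec_solution; infer_instance

-- ===== CLAIM (what is proved, stated in full; the proofs are below) =====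
def Claim_equal_solution : Prop := ∀ (topping : List Int), Dom_solution topping → Spec_solution topping (solution topping)

-- ===== LEMMAS AND PROOFS =====

-- number of distinct elements of a list
def dlen (xs : List Int) : Nat := (PySem.Set.ofList xs).length

-- distinct count only depends on the members
theorem dlen_perm {xs ys : List Int} (h : xs.Perm ys) : dlen xs = dlen ys := by
  unfold dlen
  have hp : (PySem.Set.ofList xs).Perm (PySem.Set.ofList ys) := by
    refine (List.perm_ext_iff_of_nodup (PySem.Set.nodup_ofList _) (PySem.Set.nodup_ofList _)).2 ?_
    intro a
    simp only [PySem.Set.mem_ofList]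
    exact h.mem_iff
  exact hp.length_eq

-- a dict with Nodup keys whose key set is the members of s has size dlen s
theorem size_eq_dlen (d : PySem.Dict Int Int) (s : List Int)
    (hn : d.keys.Nodup) (hm : ∀ k, k ∈ d.keys ↔ k ∈ s) : d.size = dlen s := by
  have hperm : d.keys.Perm (PySem.Set.ofList s) := by
    refine (List.perm_ext_iff_of_nodup hn (PySem.Set.nodup_ofList _)).2 ?_
    intro a; simp [PySem.Set.mem_ofList, hm a]
  have hl : d.keys.length = dlen s := hperm.length_eq
  simpa [PySem.Dict.keys, PySem.Dict.size] using hl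

-- erase: membership in keys
theorem keys_erase_mem (d : PySem.Dict Int Int) (k j : Int) :
    j ∈ (d.erase k).keys ↔ j ∈ d.keys ∧ j ≠ k := by
  simp only [PySem.Dict.erase, PySem.Dict.keys, List.mem_map, List.mem_filter,
    Bool.not_eq_eq_eq_not, Bool.not_true, beq_eq_false_iff_ne, ne_eq]
  constructor
  · rintro ⟨p, ⟨hp, hpk⟩, rfl⟩
    exact ⟨⟨p, hp, rfl⟩, hpk⟩
  · rintro ⟨⟨p, hp, rfl⟩, hk⟩
    exact ⟨p, ⟨hp, hk⟩, rfl⟩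

-- erase preserves Nodup keys
theorem keys_erase_nodup (d : PySem.Dict Int Int) (k : Int)
    (hn : d.keys.Nodup) : (d.erase k).keys.Nodup := by
  have hs : (d.erase k).keys.Sublist d.keys := by
    simp only [PySem.Dict.erase, PySem.Dict.keys]
    exact List.Sublist.map _ List.filter_sublist
  exact hn.sublist hs

-- erase: lookup
theorem getD_erase (d : PySem.Dict Int Int) (k j : Int) :
    (d.erase k).getD j 0 = if j = k then 0 else d.getD j 0 := by
  by_cases h : j = k
  · subst h
    have : List.find? (fun p => p.1 == j) (d.items.filter (fun p => !p.1 == j)) = none := by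
      rw [List.find?_eq_none]
      intro p hp
      have := (List.mem_filter.1 hp).2
      simpa using this
    simp [PySem.Dict.erase, PySem.Dict.getD, PySem.Dict.get?, this]
  · have hfind : List.find? (fun p => p.1 == j) (d.items.filter (fun p => !p.1 == k))
        = List.find? (fun p => p.1 == j) d.items := by
      induction d.items with
      | nil => simp
      | cons a l ih =>
        have hkj : ¬ (k = j) := fun he => h he.symm
        by_cases hak : a.1 = k
        · have haj : ¬ (a.1 = j) := fun he => h (hak ▸ he ▸ rfl)
          simp [List.filter_cons, List.find?_cons, hak, haj, hkj, ih]
        · by_cases haj : a.1 = j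
          · simp [List.filter_cons, List.find?_cons, hak, haj, hkj, h]
          · simp [List.filter_cons, List.find?_cons, hak, haj, hkj, ih]
    simp [PySem.Dict.erase, PySem.Dict.getD, PySem.Dict.get?, hfind, h]

-- ===== A's loop =====
theorem A_loop (s : List Int) : ∀ (d : PySem.Dict Int Int) (e : PySem.Set Int) (ans : Int),
    d.keys.Nodup → (∀ k, k ∈ d.keys ↔ k ∈ s) → (∀ k, d.getD k 0 = (s.count k : Int)) →
    (s.foldl Astep (d, e, ans)).2.2
      = ans + ((List.range s.length).map
          (fun i => if (PySem.Set.update e (s.take (i+1))).length = dlen (s.drop (i+1))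
                    then (1:Int) else 0)).sum := by
  induction s with
  | nil => intro d e ans _ _ _; simp
  | cons x s' ih =>
    intro d e ans hn hm hc
    have hxk : x ∈ d.keys := (hm x).2 (List.mem_cons_self)
    have hcont : d.contains x = true := (PySem.Dict.contains_iff_mem_keys d x).2 hxk
    -- the state after one iteration
    have hdx : d.getD x 0 = ((s'.count x : Int) + 1) := by
      have := hc x
      rw [List.count_cons_self] at this
      push_cast at this
      exact this
    set d1 := d.modify x 0 (· - 1) with hd1
    have hd1eq : d1 = d.insert x ((s'.count x : Int)) := by
      rw [hd1, PySem.Dict.modify, hdx]; ring_nf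
    have hk1 : d1.keys = d.keys := by
      rw [hd1eq]; exact PySem.Dict.keys_insert_of_contains d _ hcont
    have hg1 : ∀ j, d1.getD j 0 = (s'.count j : Int) := by
      intro j
      rw [hd1eq, PySem.Dict.getD_insert]
      by_cases hj : j = x
      · simp [hj]
      · have := hc j
        rw [List.count_cons_of_ne (Ne.symm hj)] at this
        simp [hj, this]
    -- the dict after the conditional pop
    set d2 := if d1.getD x 0 = 0 then d1.erase x else d1 with hd2
    have hn2 : d2.keys.Nodup := by
      rw [hd2]
      split
      · exact keys_erase_nodup _ _ (hk1 ▸ hn)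
      · exact hk1 ▸ hn
    have hm2 : ∀ j, j ∈ d2.keys ↔ j ∈ s' := by
      intro j
      rw [hd2]
      split
      · rename_i h0
        rw [hg1 x] at h0
        have h0' : s'.count x = 0 := by exact_mod_cast h0
        have hxs : x ∉ s' := List.count_eq_zero.1 h0'
        rw [keys_erase_mem, hk1, hm j]
        constructor
        · rintro ⟨hj, hne⟩
          rcases List.mem_cons.1 hj with rfl | hj'
          · exact absurd rfl hne
          · exact hj'
        · intro hj
          refine ⟨List.mem_cons_of_mem _ hj, ?_⟩
          rintro rfl; exact hxs hj
      · rename_i h0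
        rw [hg1 x] at h0
        have hxs : x ∈ s' := by
          by_contra hmem
          have hz : s'.count x = 0 := List.count_eq_zero.2 hmem
          rw [hz] at h0
          exact h0 (by norm_num)
        rw [hk1, hm j]
        constructor
        · intro hj
          rcases List.mem_cons.1 hj with rfl | hj'
          · exact hxs
          · exact hj'
        · exact List.mem_cons_of_mem _
    have hg2 : ∀ j, d2.getD j 0 = (s'.count j : Int) := by
      intro j
      rw [hd2]
      split
      · rename_i h0
        rw [hg1 x] at h0
        rw [getD_erase]
        have h0' : s'.count x = 0 := by exact_mod_cast h0
        by_cases hj : j = x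
        · subst hj; simp [h0']
        · simp [hj, hg1 j]
      · exact hg1 j
    have hsize : d2.size = dlen s' := size_eq_dlen _ _ hn2 hm2
    -- unfold one step of the fold
    rw [List.foldl_cons]
    show (s'.foldl Astep
        (d2, PySem.Set.add e x, if d2.size = PySem.Set.len (PySem.Set.add e x) then ans + 1 else ans)).2.2 = _
    rw [ih d2 (PySem.Set.add e x) _ hn2 hm2 hg2]
    -- split the sum on the right
    rw [List.length_cons, List.range_succ_eq_map, List.map_cons, List.map_map, List.sum_cons]
    simp only [List.take_succ_cons, List.take_zero, Function.comp_def,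
      PySem.Set.update_cons, PySem.Set.update_nil, List.drop_succ_cons, List.drop_zero]
    rw [hsize]
    have hlen : PySem.Set.len (PySem.Set.add e x) = (PySem.Set.add e x).length := rfl
    rw [hlen]
    simp only [Nat.succ_eq_add_one]
    by_cases hcnd : (PySem.Set.add e x).length = dlen s'
    · rw [if_pos (by exact_mod_cast hcnd.symm : ((dlen s' : Int)) = ((PySem.Set.add e x).length : Int)),
        if_pos hcnd]
      ring
    · rw [if_neg (fun hcast => hcnd (by exact_mod_cast hcast.symm)), if_neg hcnd]
      ring

-- ===== B's loops =====
theorem B_rev_loop (ys : List Int) : ∀ (s : PySem.Set Int) (acc : List Int),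
    (ys.foldl (fun (p : PySem.Set Int × List Int) x =>
        (PySem.Set.add p.1 x, p.2 ++ [(PySem.Set.len p.1 : Int)])) (s, acc)).2
      = acc ++ (List.range ys.length).map
          (fun j => ((PySem.Set.update s (ys.take j)).length : Int)) := by
  induction ys with
  | nil => intro s acc; simp
  | cons x ys ih =>
    intro s acc
    rw [List.foldl_cons, ih]
    rw [List.length_cons, List.range_succ_eq_map, List.map_cons, List.map_map]
    simp only [List.take_succ_cons, List.take_zero, PySem.Set.update_cons,
      List.append_assoc, List.singleton_append]
    congr 2

theorem B_left_loop (xs : List Int) : ∀ (s : PySem.Set Int) (acc : List Int),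
    (xs.foldl (fun (p : PySem.Set Int × List Int) x =>
        let t := PySem.Set.add p.1 x
        (t, p.2 ++ [(PySem.Set.len t : Int)])) (s, acc)).2
      = acc ++ (List.range xs.length).map
          (fun i => ((PySem.Set.update s (xs.take (i+1))).length : Int)) := by
  induction xs with
  | nil => intro s acc; simp
  | cons x xs ih =>
    intro s acc
    rw [List.foldl_cons]
    simp only []
    rw [ih]
    rw [List.length_cons, List.range_succ_eq_map, List.map_cons, List.map_map]
    simp only [List.take_succ_cons, List.take_zero, PySem.Set.update_cons, PySem.Set.update_nil,
      List.append_assoc, List.singleton_append]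
    congr 2

-- B's rights list in closed form
theorem rights_closed (topping : List Int) :
    (((topping.reverse.foldl
        (fun (p : PySem.Set Int × List Int) x =>
          (PySem.Set.add p.1 x, p.2 ++ [(PySem.Set.len p.1 : Int)]))
        (PySem.Set.empty, [])).2).reverse)
      = (List.range topping.length).map (fun i => (dlen (topping.drop (i+1)) : Int)) := by
  rw [B_rev_loop]
  simp only [List.nil_append, List.length_reverse]
  apply List.ext_getElem
  · simp
  · intro i h1 h2
    simp only [List.length_reverse, List.length_map, List.length_range] at h1 h2
    rw [List.getElem_reverse]
    simp only [List.length_map, List.length_range, List.getElem_map, List.getElem_range]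
    simp only [PySem.Set.empty, PySem.Set.update_nil_left]
    have hperm : dlen (topping.reverse.take (topping.length - 1 - i))
        = dlen (topping.drop (i+1)) := by
      rw [List.take_reverse]
      have harith : topping.length - (topping.length - 1 - i) = i + 1 := by omega
      rw [harith]
      exact dlen_perm (List.reverse_perm _)
    show ((dlen (topping.reverse.take (topping.length - 1 - i)) : Int)) = _
    rw [hperm]

-- B's lefts list in closed form
theorem lefts_closed (topping : List Int) :
    ((topping.foldl
        (fun (p : PySem.Set Int × List Int) x =>
          let t := PySem.Set.add p.1 x
          (t, p.2 ++ [(PySem.Set.len t : Int)]))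
        (PySem.Set.empty, [])).2)
      = (List.range topping.length).map (fun i => (dlen (topping.take (i+1)) : Int)) := by
  rw [B_left_loop]
  simp only [List.nil_append]
  apply List.map_congr_left
  intro i _
  simp only [PySem.Set.empty, PySem.Set.update_nil_left]
  rfl

-- ===== VERDICT (by name: the statement is the Claim_ definition above) =====
theorem solution_spec : Claim_equal_solution := by
  intro topping _
  unfold Spec_solution
  simp only [solution, solution_alt]
  -- A's side
  rw [A_loop topping (PySem.Dict.counter topping) PySem.Set.empty 0
      (PySem.Dict.nodup_keys_counter topping)
      (by intro k
          rw [PySem.Dict.keys_counter]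
          exact PySem.Set.mem_ofList _ _)
      (fun k => PySem.Dict.getD_counter topping k)]
  -- B's side
  rw [rights_closed, lefts_closed, List.zip_map',
    PySem.List.foldl_count_if, List.countP_map]
  have hpt : ∀ i ∈ List.range topping.length,
      (if (PySem.Set.update PySem.Set.empty (topping.take (i+1))).length
            = dlen (topping.drop (i+1)) then (1:Int) else 0)
        = (if ((fun p : Int × Int => p.1 == p.2) ∘
              (fun a : Nat => ((dlen (topping.take (a+1)) : Int), (dlen (topping.drop (a+1)) : Int)))) i
              = true then (1:Int) else 0) := by
    intro i _
    simp only [PySem.Set.empty, PySem.Set.update_nil_left, Function.comp_def]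
    simp [dlen, beq_iff_eq]
  rw [List.map_congr_left hpt, PySem.List.sum_map_ite_one_zero]
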